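-- pv_equiv track=rewrite | github.com/behzad1978/public-chatterbox-core | src/twitter_param_check_3.py | remove_duplicate_tweets
-- ===== SOURCE A (Python) =====
-- import difflib
--
-- def remove_duplicate_tweets(tweets_list):
--     return_list = []
--     while len(tweets_list)>0:
--         t = tweets_list[0]
--         duplicates = [s for s in tweets_list if difflib.SequenceMatcher(None,s,t).quick_ratio()>0.95]
--         return_list.append([t, len(duplicates)])
--         tweets_list = [x for x in tweets_list if x not in duplicates]
--     return return_list
-- ===== SOURCE B (Python) =====
-- from collections import Counter
--
-- def _similar(s, t):
--     # difflib.SequenceMatcher(None, s, t).quick_ratio() > 0.95, computed exactly: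
--     # quick_ratio = 2*M/(len(s)+len(t)) with M = sum over chars of min(count_s, count_t)
--     # (and 1.0 when both strings are empty); 2*M/T > 0.95  <=>  40*M > 19*T.
--     total = len(s) + len(t)
--     if total == 0:
--         return True
--     ct = Counter(t)
--     m = sum(min(k, ct[ch]) for ch, k in Counter(s).items())
--     return 40 * m > 19 * total
--
-- def remove_duplicate_tweets(tweets_list):
--     # One pass: each tweet joins the first existing cluster whose representative
--     # it matches, otherwise starts a new cluster of count 1.
--     clusters = []
--     for x in tweets_list:
--         for c in clusters:
--             if _similar(x, c[0]):
--                 c[1] += 1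
--                 break
--         else:
--             clusters.append([x, 1])
--     return clusters
-- ===== Notes on version B (the rewrite author's own statement) =====
-- stated objective: alternative
-- what changed: B replaces A's while-loop that repeatedly scans the remaining list for duplicates of its head and rebuilds the list without them by a single left-to-right pass that assigns each tweet to the first existing cluster representative it matches (quick_ratio > 0.95) or opens a new cluster, maintaining (representative, count) pairs in place.
import Mathlib
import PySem

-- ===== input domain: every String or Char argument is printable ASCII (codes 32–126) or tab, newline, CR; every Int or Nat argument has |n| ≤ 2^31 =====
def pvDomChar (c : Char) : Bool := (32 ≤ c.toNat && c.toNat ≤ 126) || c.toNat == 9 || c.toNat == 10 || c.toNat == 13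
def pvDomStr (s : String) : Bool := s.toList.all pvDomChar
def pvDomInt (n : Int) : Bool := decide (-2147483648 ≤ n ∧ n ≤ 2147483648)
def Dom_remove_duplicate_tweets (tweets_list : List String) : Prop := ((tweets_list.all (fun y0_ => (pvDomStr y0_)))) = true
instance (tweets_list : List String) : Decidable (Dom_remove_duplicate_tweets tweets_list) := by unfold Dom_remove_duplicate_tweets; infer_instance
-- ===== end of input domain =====

-- B is a one-pass clustering (each tweet joins the first matching representative or opens a
-- new cluster) instead of A's repeated scan-and-rebuild of the remaining list; return value only.

-- Shared port of the library call `difflib.SequenceMatcher(None, a, b).quick_ratio() > 0.95`: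
-- quick_ratio returns 2*M/(len a + len b) with M = Σ_c min(count_a c, count_b c) (and 1.0 when
-- both strings are empty); the float comparison with 0.95 is exact as the rational test
-- 40*M > 19*(len a + len b) for all string lengths reachable here.
def pvQuickGT (a b : String) : Bool :=
  let la := a.toList.length
  let lb := b.toList.length
  if la + lb = 0 then true
  else decide (19 * (la + lb) < 40 * ((a.toList.dedup.map (fun c => min (a.toList.count c) (b.toList.count c))).sum))

theorem pvQuickGT_self (t : String) : pvQuickGT t t = true := by
  unfold pvQuickGT
  by_cases h : t.toList.length + t.toList.length = 0
  · rw [if_pos h]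
  · rw [if_neg h, decide_eq_true_eq]
    have hmin : (t.toList.dedup.map (fun c => min (t.toList.count c) (t.toList.count c))).sum
        = t.toList.length := by
      simp only [min_self]
      exact List.sum_map_count_dedup_eq_length t.toList
    rw [hmin]
    omega

theorem pv_filter_len_lt (t : String) (r : List String) (p : String → Bool) (hp : p t = false) :
    ((t :: r).filter p).length < (t :: r).length := by
  simp only [List.filter, hp]
  have := List.length_filter_le p r
  simp only [List.length_cons]
  omega

-- ===== PORT A =====
def remove_duplicate_tweets (tweets_list : List String) : List (String × Int) :=
  match tweets_list with
  | [] => []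
  | t :: rest =>
    let dups := (t :: rest).filter (fun s => pvQuickGT s t)
    (t, (dups.length : Int)) ::
      remove_duplicate_tweets ((t :: rest).filter (fun x => !(dups.contains x)))
termination_by tweets_list.length
decreasing_by
  refine pv_filter_len_lt t rest _ ?_
  simp
  exact pvQuickGT_self t

-- ===== PORT B =====
-- inner `for c in clusters: … break / else append` loop of Source B
def pvStep (clusters : List (String × Int)) (x : String) : List (String × Int) :=
  match clusters with
  | [] => [(x, 1)]
  | (r, c) :: rest =>
    if pvQuickGT x r then (r, c + 1) :: rest
    else (r, c) :: pvStep rest x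

def remove_duplicate_tweets_alt (tweets_list : List String) : List (String × Int) :=
  tweets_list.foldl pvStep []

-- ===== PRECONDITION & SPEC =====
def Spec_remove_duplicate_tweets (tweets_list : List String) (out : List (String × Int)) : Prop := out = remove_duplicate_tweets_alt tweets_list
instance (tweets_list : List String) (out : List (String × Int)) : Decidable (Spec_remove_duplicate_tweets tweets_list out) := by unfold Spec_remove_duplicate_tweets; infer_instance

-- ===== CLAIM (what is proved, stated in full; the proofs are below) =====
def Claim_equal_remove_duplicate_tweets : Prop := ∀ (tweets_list : List String), Dom_remove_duplicate_tweets tweets_list → Spec_remove_duplicate_tweets tweets_list (remove_duplicate_tweets tweets_list)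

-- ===== LEMMAS AND PROOFS =====

-- membership in `duplicates` is the same as matching the representative (both sides value-based)
theorem pv_contains_dups (t x : String) (l : List String) (hx : x ∈ l) :
    (l.filter (fun s => pvQuickGT s t)).contains x = pvQuickGT x t := by
  by_cases h : pvQuickGT x t = true
  · have hm : x ∈ l.filter (fun s => pvQuickGT s t) := List.mem_filter.mpr ⟨hx, h⟩
    rw [h]
    exact List.contains_iff_mem.mpr hm
  · simp only [Bool.not_eq_true] at h
    rw [h]
    rw [Bool.eq_false_iff]
    intro hc
    have hm := List.contains_iff_mem.mp hc
    have := (List.mem_filter.mp hm).2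
    rw [h] at this
    exact Bool.false_ne_true this

-- processing r against a state headed by (t,c): the head accumulates the matches of t,
-- the non-matches flow on to the tail state
theorem pv_foldl_head (r : List String) (t : String) (c : Int) (cs : List (String × Int)) :
    r.foldl pvStep ((t, c) :: cs)
      = (t, c + ((r.filter (fun x => pvQuickGT x t)).length : Int))
          :: (r.filter (fun x => !(pvQuickGT x t))).foldl pvStep cs := by
  induction r generalizing c cs with
  | nil => simp
  | cons x r' ih =>
    by_cases h : pvQuickGT x t = true
    · rw [List.foldl_cons, List.filter_cons, List.filter_cons, if_pos h,
        if_neg (by rw [h]; exact Bool.false_ne_true)]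
      rw [show pvStep ((t, c) :: cs) x = (t, c + 1) :: cs from by simp [pvStep, h]]
      rw [ih]
      refine congrArg₂ _ ?_ rfl
      refine congrArg _ ?_
      simp only [List.length_cons]
      push_cast
      ring
    · have hf : pvQuickGT x t = false := Bool.eq_false_iff.mpr h
      rw [List.foldl_cons, List.filter_cons, List.filter_cons, if_neg h,
        if_pos (by rw [hf]; rfl)]
      rw [show pvStep ((t, c) :: cs) x = (t, c) :: pvStep cs x from by simp [pvStep, hf]]
      rw [ih, List.foldl_cons]

theorem pv_main (n : Nat) : ∀ (l : List String), l.length ≤ n →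
    remove_duplicate_tweets l = l.foldl pvStep [] := by
  induction n with
  | zero =>
    intro l hl
    have : l = [] := List.eq_nil_of_length_eq_zero (Nat.le_zero.mp hl)
    subst this; simp [remove_duplicate_tweets]
  | succ n ih =>
    intro l hl
    match l with
    | [] => simp [remove_duplicate_tweets]
    | t :: r =>
      rw [remove_duplicate_tweets]
      have hfilt : ((t :: r).filter (fun x =>
          !(((t :: r).filter (fun s => pvQuickGT s t)).contains x)))
          = r.filter (fun x => !(pvQuickGT x t)) := by
        rw [List.filter_cons]
        rw [pv_contains_dups t t (t :: r) List.mem_cons_self, pvQuickGT_self]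
        simp only [Bool.not_true]
        rw [if_neg Bool.false_ne_true]
        exact List.filter_congr (fun x hx => by
          rw [pv_contains_dups t x (t :: r) (List.mem_cons_of_mem _ hx)])
      have hdups : ((t :: r).filter (fun s => pvQuickGT s t)).length
          = 1 + (r.filter (fun x => pvQuickGT x t)).length := by
        rw [List.filter_cons, pvQuickGT_self]
        rw [if_pos rfl]
        simp [Nat.add_comm]
      have hrec : remove_duplicate_tweets (r.filter (fun x => !(pvQuickGT x t)))
          = (r.filter (fun x => !(pvQuickGT x t))).foldl pvStep [] := by
        apply ih
        have := List.length_filter_le (fun x => !(pvQuickGT x t)) r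
        simp only [List.length_cons] at hl
        omega
      rw [hfilt, hrec, hdups]
      simp only [List.foldl_cons, pvStep]
      rw [pv_foldl_head r t 1 []]
      refine congrArg₂ _ ?_ rfl
      refine congrArg _ ?_
      push_cast
      ring

-- ===== VERDICT (by name: the statement is the Claim_ definition above) =====
theorem remove_duplicate_tweets_spec : Claim_equal_remove_duplicate_tweets := by
  intro l _
  unfold Spec_remove_duplicate_tweets remove_duplicate_tweets_alt
  exact pv_main l.length l (Nat.le_refl _)
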